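-- pv_equiv track=rewrite | github.com/T1T4N/MiniTimeMK | web2py/applications/MiniTimeMK/models/HAC.py | get_children_clusters
-- ===== SOURCE A (Python) =====
-- def get_children_clusters(result_dict, key, eliminated):
--     """
--     DFS search for the post_id in the result dictionary values
--
--     :type result_dict: dict
--     :type key: int
--     :param eliminated:
--     :return:
--     """
--
--     ret = []
--     eliminated.add(key)
--     if result_dict.get(key, None) is None:
--         ret.append(key)
--     else:
--         for c_id in result_dict[key]:
--             if c_id not in eliminated:
--                 ret += get_children_clusters(result_dict, c_id, eliminated)
--     return ret
-- ===== SOURCE B (Python) =====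
-- def get_children_clusters(result_dict, key, eliminated):
--     """Iterative DFS (explicit stack) instead of recursion; same return value
--     and same mutation of `eliminated` (all visited ids are added)."""
--     eliminated.add(key)
--     children = result_dict.get(key)
--     if children is None:
--         return [key]
--     ret = []
--     stack = list(reversed(children))
--     while stack:
--         c_id = stack.pop()
--         if c_id in eliminated:
--             continue
--         eliminated.add(c_id)
--         cs = result_dict.get(c_id)
--         if cs is None:
--             ret.append(c_id)
--         else:
--             stack.extend(reversed(cs))
--     return ret
-- ===== Notes on version B (the rewrite author's own statement) =====
-- stated objective: alternative
-- what changed: A's recursive pre-order DFS (recursion into each un-eliminated child, list concatenation of subtree results) is replaced by an iterative DFS with an explicit stack of pending node ids, marking and emitting each node when it is popped; same return value and the same mutation of the eliminated set.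
import Mathlib
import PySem

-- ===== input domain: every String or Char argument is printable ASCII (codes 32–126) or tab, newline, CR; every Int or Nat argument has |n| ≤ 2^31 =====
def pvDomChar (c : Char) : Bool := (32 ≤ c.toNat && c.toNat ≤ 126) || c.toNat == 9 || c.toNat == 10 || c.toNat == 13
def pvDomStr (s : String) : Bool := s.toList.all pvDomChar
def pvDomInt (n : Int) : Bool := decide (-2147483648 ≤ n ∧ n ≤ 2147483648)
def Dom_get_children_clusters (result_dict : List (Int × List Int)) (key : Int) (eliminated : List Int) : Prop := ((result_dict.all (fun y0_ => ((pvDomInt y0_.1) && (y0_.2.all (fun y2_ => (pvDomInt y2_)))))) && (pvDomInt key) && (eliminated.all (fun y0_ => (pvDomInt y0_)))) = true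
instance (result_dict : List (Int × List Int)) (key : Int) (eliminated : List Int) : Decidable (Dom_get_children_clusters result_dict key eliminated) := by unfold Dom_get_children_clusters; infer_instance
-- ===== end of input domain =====

-- B replaces A's recursive DFS by an iterative DFS over an explicit stack (same return value;
-- both Pythons mutate `eliminated` identically by adding every visited id — the theorems below
-- are about the return value). Objective: alternative (no recursion, no asymptotic change).

-- ===== PORT A =====
-- result_dict.get(key, None): the assoc list is the Python dict, first-match lookup.
def pvLookup (rd : List (Int × List Int)) (k : Int) : Option (List Int) :=
  (PySem.Dict.mk rd).get? k

-- A is recursive; the Nat argument is pure totality fuel (never exhausted: `runA_suff` below;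
-- the wrapper passes rd.length + 2, provably enough). `eliminated` (a Python set) is threaded.
mutual
  -- one call of A: add key to eliminated; leaf → [key]; else loop over the children
  def goA (rd : List (Int × List Int)) : Nat → Int → PySem.Set Int → Option (List Int × PySem.Set Int)
    | 0, _, _ => none
    | f + 1, key, elim =>
      let elim2 := PySem.Set.add elim key
      match pvLookup rd key with
      | none => some ([key], elim2)
      | some cs => runA rd f cs elim2
  termination_by f _ _ => (f, 0)
  -- A's `for c_id in result_dict[key]` loop; `ret` is the first component of the result
  def runA (rd : List (Int × List Int)) : Nat → List Int → PySem.Set Int → Option (List Int × PySem.Set Int)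
    | _, [], elim => some ([], elim)
    | f, c :: cs, elim =>
      if PySem.Set.contains elim c then runA rd f cs elim
      else
        match goA rd f c elim with
        | none => none
        | some (r1, e1) =>
          match runA rd f cs e1 with
          | none => none
          | some (r2, e2) => some (r1 ++ r2, e2)
  termination_by f cs _ => (f, cs.length + 1)
end

def get_children_clusters (result_dict : List (Int × List Int)) (key : Int) (eliminated : List Int) : List Int :=
  match goA result_dict (result_dict.length + 2) key (PySem.Set.ofList eliminated) with
  | some (r, _) => r
  | none => []

-- ===== PORT B =====
-- helpers computing B's (provably sufficient) totality fuel: each distinct not-yet-eliminated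
-- dict key, weighted by 1 + its number of children
def pvChildLen (rd : List (Int × List Int)) (k : Int) : Nat := ((pvLookup rd k).getD []).length

def pvWeight (rd : List (Int × List Int)) (elim : PySem.Set Int) : Nat :=
  (((PySem.List.dedup (rd.map Prod.fst)).filter (fun k => decide (k ∉ elim))).map
    (fun k => 1 + pvChildLen rd k)).sum

-- Source B's while-loop. The Lean list models the Python stack with its TOP AT THE HEAD (Python
-- pops from the end, so `list(reversed(cs))` + pop()/extend(reversed(cs)) is exactly consing
-- cs at the head). The Nat argument is totality fuel only; the wrapper's choice never runs out.
def goB (rd : List (Int × List Int)) : Nat → List Int → PySem.Set Int → List Int → Option (List Int × PySem.Set Int)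
  | _, [], elim, acc => some (acc, elim)
  | 0, _ :: _, _, _ => none
  | f + 1, c :: rest, elim, acc =>
    if PySem.Set.contains elim c then goB rd f rest elim acc
    else
      let elim2 := PySem.Set.add elim c
      match pvLookup rd c with
      | none => goB rd f rest elim2 (acc ++ [c])
      | some cs => goB rd f (cs ++ rest) elim2 acc

def get_children_clusters_alt (result_dict : List (Int × List Int)) (key : Int) (eliminated : List Int) : List Int :=
  let elim1 := PySem.Set.add (PySem.Set.ofList eliminated) key
  match pvLookup result_dict key with
  | none => [key]
  | some cs =>
    match goB result_dict (cs.length + pvWeight result_dict elim1 + 1) cs elim1 [] with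
    | some (r, _) => r
    | none => []

-- ===== PRECONDITION & SPEC =====
def Spec_get_children_clusters (result_dict : List (Int × List Int)) (key : Int) (eliminated : List Int) (out : List Int) : Prop := out = get_children_clusters_alt result_dict key eliminated
instance (result_dict : List (Int × List Int)) (key : Int) (eliminated : List Int) (out : List Int) : Decidable (Spec_get_children_clusters result_dict key eliminated out) := by unfold Spec_get_children_clusters; infer_instance

-- ===== CLAIM (what is proved, stated in full; the proofs are below) =====
def Claim_equal_get_children_clusters : Prop := ∀ (result_dict : List (Int × List Int)) (key : Int) (eliminated : List Int), Dom_get_children_clusters result_dict key eliminated → Spec_get_children_clusters result_dict key eliminated (get_children_clusters result_dict key eliminated)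

-- ===== LEMMAS AND PROOFS =====

-- a weighted sum over the not-yet-eliminated elements; pvWeight and A's key count are instances
def pvWSum (l : List Int) (elim : PySem.Set Int) (w : Int → Nat) : Nat :=
  ((l.filter (fun k => decide (k ∉ elim))).map w).sum

theorem pvWSum_mono (l : List Int) (e e' : PySem.Set Int) (w : Int → Nat)
    (h : ∀ x, x ∈ e → x ∈ e') : pvWSum l e' w ≤ pvWSum l e w := by
  unfold pvWSum
  refine ((List.monotone_filter_right l ?_).map w).sum_le_sum (fun a _ => Nat.zero_le a)
  intro a ha
  simp only [decide_eq_true_eq] at *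
  exact fun hae => ha (h a hae)

theorem pvWSum_drop (l : List Int) (c : Int) (elim : PySem.Set Int) (w : Int → Nat)
    (hnd : l.Nodup) (hm : c ∈ l) (he : c ∉ elim) :
    pvWSum l (PySem.Set.add elim c) w + w c = pvWSum l elim w := by
  induction l with
  | nil => cases hm
  | cons a t ih =>
    rcases List.nodup_cons.mp hnd with ⟨hat, hndt⟩
    unfold pvWSum at *
    simp only [List.filter_cons]
    rcases List.mem_cons.mp hm with rfl | hmt
    · have h1 : (decide (c ∉ PySem.Set.add elim c)) = false := by
        simp [PySem.Set.mem_add]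
      have h2 : (decide (c ∉ elim)) = true := by simpa using he
      have hfilt : t.filter (fun k => decide (k ∉ PySem.Set.add elim c))
          = t.filter (fun k => decide (k ∉ elim)) := by
        apply List.filter_congr
        intro k hk
        have hka : k ≠ c := fun h => hat (h ▸ hk)
        simp [PySem.Set.mem_add, hka]
      rw [h1, h2, hfilt]
      simp [Nat.add_comm]
    · have hac : a ≠ c := fun h => hat (h ▸ hmt)
      have hsame : (decide (a ∉ PySem.Set.add elim c)) = (decide (a ∉ elim)) := by
        simp [PySem.Set.mem_add, hac]
      rw [hsame]
      by_cases hd : a ∈ elim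
      · simp only [hd, not_true_eq_false, decide_false, Bool.false_eq_true, if_false]
        exact ih hndt hmt
      · simp only [hd, not_false_eq_true, decide_true, if_true, List.map_cons, List.sum_cons]
        have := ih hndt hmt
        omega

theorem pvWSum_unchanged (l : List Int) (c : Int) (elim : PySem.Set Int) (w : Int → Nat)
    (hm : c ∉ l) : pvWSum l (PySem.Set.add elim c) w = pvWSum l elim w := by
  unfold pvWSum
  congr 1
  apply congrArg
  apply List.filter_congr
  intro k hk
  have hkc : k ≠ c := fun h => hm (h ▸ hk)
  simp [PySem.Set.mem_add, hkc]

theorem pvWSum_le_length (l : List Int) (elim : PySem.Set Int) :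
    pvWSum l elim (fun _ => 1) ≤ l.length := by
  unfold pvWSum
  simp
  exact List.length_filter_le _ l

theorem pvWeight_eq (rd : List (Int × List Int)) (elim : PySem.Set Int) :
    pvWeight rd elim
      = pvWSum (PySem.List.dedup (rd.map Prod.fst)) elim (fun k => 1 + pvChildLen rd k) := rfl

-- lookup = none exactly on non-keys
theorem pvLookup_none_iff (rd : List (Int × List Int)) (k : Int) :
    pvLookup rd k = none ↔ k ∉ rd.map Prod.fst := by
  unfold pvLookup
  rw [PySem.Dict.get?_eq_none_iff_not_mem_keys, PySem.Dict.keys_mk]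

-- unfolding equations (the ports are recursive; these restate one step each)
theorem goA_zero (rd : List (Int × List Int)) (key : Int) (elim : PySem.Set Int) :
    goA rd 0 key elim = none := by rw [goA]

theorem goA_succ (rd : List (Int × List Int)) (f : Nat) (key : Int) (elim : PySem.Set Int) :
    goA rd (f + 1) key elim
      = match pvLookup rd key with
        | none => some ([key], PySem.Set.add elim key)
        | some cs => runA rd f cs (PySem.Set.add elim key) := by rw [goA]

theorem runA_nil (rd : List (Int × List Int)) (f : Nat) (elim : PySem.Set Int) :
    runA rd f [] elim = some ([], elim) := by rw [runA]

theorem runA_cons (rd : List (Int × List Int)) (f : Nat) (c : Int) (cs : List Int)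
    (elim : PySem.Set Int) :
    runA rd f (c :: cs) elim
      = if PySem.Set.contains elim c then runA rd f cs elim
        else match goA rd f c elim with
          | none => none
          | some (r1, e1) =>
            match runA rd f cs e1 with
            | none => none
            | some (r2, e2) => some (r1 ++ r2, e2) := by rw [runA]

theorem goB_nil (rd : List (Int × List Int)) (g : Nat) (elim : PySem.Set Int) (acc : List Int) :
    goB rd g [] elim acc = some (acc, elim) := by cases g <;> rw [goB]

theorem goB_cons (rd : List (Int × List Int)) (g : Nat) (c : Int) (rest : List Int)
    (elim : PySem.Set Int) (acc : List Int) :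
    goB rd (g + 1) (c :: rest) elim acc
      = if PySem.Set.contains elim c then goB rd g rest elim acc
        else match pvLookup rd c with
          | none => goB rd g rest (PySem.Set.add elim c) (acc ++ [c])
          | some cs => goB rd g (cs ++ rest) (PySem.Set.add elim c) acc := by rw [goB]

-- eliminated only grows through A (needed to propagate fuel bounds)
theorem pv_growA (rd : List (Int × List Int)) :
    ∀ f, (∀ key elim r e, goA rd f key elim = some (r, e) → ∀ x, x ∈ elim → x ∈ e)
       ∧ (∀ cs elim r e, runA rd f cs elim = some (r, e) → ∀ x, x ∈ elim → x ∈ e) := by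
  intro f
  induction f using Nat.strong_induction_on with
  | _ f IH =>
    have hgo : ∀ key elim r e, goA rd f key elim = some (r, e) → ∀ x, x ∈ elim → x ∈ e := by
      intro key elim r e hg x hx
      cases f with
      | zero => rw [goA_zero] at hg; cases hg
      | succ f' =>
        rw [goA_succ] at hg
        have hx2 : x ∈ PySem.Set.add elim key := by
          rw [PySem.Set.mem_add]; exact Or.inl hx
        cases hl : pvLookup rd key with
        | none =>
          rw [hl] at hg
          cases hg
          exact hx2
        | some cs =>
          rw [hl] at hg
          exact (IH f' (Nat.lt_succ_self f')).2 cs _ r e hg x hx2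
    refine ⟨hgo, ?_⟩
    intro cs
    induction cs with
    | nil =>
      intro elim r e hg x hx
      rw [runA_nil] at hg
      cases hg
      exact hx
    | cons c cs' ih =>
      intro elim r e hg x hx
      rw [runA_cons] at hg
      by_cases hc : PySem.Set.contains elim c = true
      · rw [if_pos hc] at hg
        exact ih elim r e hg x hx
      · rw [if_neg hc] at hg
        cases h1 : goA rd f c elim with
        | none => rw [h1] at hg; cases hg
        | some p1 =>
          obtain ⟨r1, e1⟩ := p1
          rw [h1] at hg
          dsimp only at hg
          cases h2 : runA rd f cs' e1 with
          | none => rw [h2] at hg; cases hg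
          | some p2 =>
            obtain ⟨r2, e2⟩ := p2
            rw [h2] at hg
            dsimp only at hg
            have hgrow := ih e1 r2 e2 h2 x (hgo c elim r1 e1 h1 x hx)
            cases hg
            exact hgrow

-- number of distinct dict keys not yet eliminated: A's fuel bound
def pvNA (rd : List (Int × List Int)) (elim : PySem.Set Int) : Nat :=
  pvWSum (PySem.List.dedup (rd.map Prod.fst)) elim (fun _ => 1)

-- fuel pvNA < f is enough for A's loop
theorem pvNA_mono (rd : List (Int × List Int)) (e e' : PySem.Set Int)
    (h : ∀ x, x ∈ e → x ∈ e') : pvNA rd e' ≤ pvNA rd e := by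
  unfold pvNA; exact pvWSum_mono _ _ _ _ h

theorem pvNA_drop (rd : List (Int × List Int)) (c : Int) (elim : PySem.Set Int)
    (hck : c ∈ rd.map Prod.fst) (hcne : c ∉ elim) :
    pvNA rd (PySem.Set.add elim c) + 1 = pvNA rd elim := by
  unfold pvNA
  exact pvWSum_drop _ c elim _ (PySem.List.nodup_dedup _) ((PySem.List.mem_dedup _ c).mpr hck) hcne

theorem mem_add_left (s : PySem.Set Int) (c x : Int) (hx : x ∈ s) : x ∈ PySem.Set.add s c := by
  rw [PySem.Set.mem_add]; exact Or.inl hx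

theorem runA_suff (rd : List (Int × List Int)) :
    ∀ f cs elim, pvNA rd elim < f → ∃ r e, runA rd f cs elim = some (r, e) := by
  intro f
  induction f using Nat.strong_induction_on with
  | _ f IH =>
    intro cs
    induction cs with
    | nil => intro elim _; exact ⟨[], elim, runA_nil rd f elim⟩
    | cons c cs' ih =>
      intro elim h
      rw [runA_cons]
      by_cases hc : PySem.Set.contains elim c = true
      · rw [if_pos hc]; exact ih elim h
      · rw [if_neg hc]
        have hcne : c ∉ elim := by
          intro hmem; exact hc ((PySem.Set.contains_iff _ _).mpr hmem)
        obtain ⟨f', rfl⟩ : ∃ f', f = f' + 1 := ⟨f - 1, by omega⟩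
        rw [goA_succ]
        cases hl : pvLookup rd c with
        | none =>
          have hmono : pvNA rd (PySem.Set.add elim c) ≤ pvNA rd elim :=
            pvNA_mono rd _ _ (mem_add_left elim c)
          obtain ⟨r2, e2, h2⟩ := ih (PySem.Set.add elim c) (lt_of_le_of_lt hmono h)
          exact ⟨[c] ++ r2, e2, by dsimp only; rw [h2]⟩
        | some ds =>
          have hck : c ∈ rd.map Prod.fst := by
            by_contra hk
            rw [← pvLookup_none_iff] at hk; rw [hk] at hl; cases hl
          have hdrop := pvNA_drop rd c elim hck hcne
          obtain ⟨r1, e1, h1⟩ := IH f' (Nat.lt_succ_self f') ds (PySem.Set.add elim c) (by omega)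
          have hsub : ∀ x, x ∈ PySem.Set.add elim c → x ∈ e1 :=
            (pv_growA rd f').2 ds _ r1 e1 h1
          have hle : pvNA rd e1 ≤ pvNA rd (PySem.Set.add elim c) := pvNA_mono rd _ _ hsub
          obtain ⟨r2, e2, h2⟩ := ih e1 (by omega)
          exact ⟨r1 ++ r2, e2, by dsimp only; rw [h1]; dsimp only; rw [h2]⟩

-- B's loop measure: it strictly decreases at every iteration
def pvM (rd : List (Int × List Int)) (stack : List Int) (elim : PySem.Set Int) : Nat :=
  stack.length + pvWeight rd elim

-- B's result does not depend on the fuel, as long as pvM < fuel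
theorem pvWeight_mono (rd : List (Int × List Int)) (e e' : PySem.Set Int)
    (h : ∀ x, x ∈ e → x ∈ e') : pvWeight rd e' ≤ pvWeight rd e := by
  rw [pvWeight_eq, pvWeight_eq]; exact pvWSum_mono _ _ _ _ h

theorem pvWeight_unchanged (rd : List (Int × List Int)) (c : Int) (elim : PySem.Set Int)
    (hl : pvLookup rd c = none) :
    pvWeight rd (PySem.Set.add elim c) = pvWeight rd elim := by
  rw [pvWeight_eq, pvWeight_eq]
  apply pvWSum_unchanged
  intro hmem
  exact ((pvLookup_none_iff rd c).mp hl) ((PySem.List.mem_dedup _ c).mp hmem)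

theorem pvWeight_drop (rd : List (Int × List Int)) (c : Int) (cs : List Int)
    (elim : PySem.Set Int) (hl : pvLookup rd c = some cs) (hcne : c ∉ elim) :
    pvWeight rd (PySem.Set.add elim c) + (1 + cs.length) = pvWeight rd elim := by
  have hck : c ∈ rd.map Prod.fst := by
    by_contra hk
    rw [← pvLookup_none_iff] at hk; rw [hk] at hl; cases hl
  have hcl : pvChildLen rd c = cs.length := by unfold pvChildLen; rw [hl]; rfl
  have := pvWSum_drop (PySem.List.dedup (rd.map Prod.fst)) c elim
    (fun k => 1 + pvChildLen rd k) (PySem.List.nodup_dedup _)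
    ((PySem.List.mem_dedup _ c).mpr hck) hcne
  rw [pvWeight_eq, pvWeight_eq]
  simp only [hcl] at this
  exact this

theorem goB_congr (rd : List (Int × List Int)) :
    ∀ g g' stack elim acc, pvM rd stack elim < g → pvM rd stack elim < g' →
      goB rd g stack elim acc = goB rd g' stack elim acc := by
  intro g
  induction g using Nat.strong_induction_on with
  | _ g IH =>
    intro g' stack elim acc h h'
    cases stack with
    | nil => rw [goB_nil, goB_nil]
    | cons c rest =>
      have hM : pvM rd (c :: rest) elim = rest.length + 1 + pvWeight rd elim := by
        simp [pvM]
      obtain ⟨g1, rfl⟩ : ∃ x, g = x + 1 := ⟨g - 1, by omega⟩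
      obtain ⟨g1', rfl⟩ : ∃ x, g' = x + 1 := ⟨g' - 1, by omega⟩
      rw [goB_cons, goB_cons]
      by_cases hc : PySem.Set.contains elim c = true
      · rw [if_pos hc, if_pos hc]
        have hb : pvM rd rest elim + 1 = pvM rd (c :: rest) elim := by
          simp [pvM]; omega
        exact IH g1 (by omega) g1' rest elim acc (by omega) (by omega)
      · rw [if_neg hc, if_neg hc]
        have hcne : c ∉ elim := fun hmem => hc ((PySem.Set.contains_iff _ _).mpr hmem)
        cases hl : pvLookup rd c with
        | none =>
          dsimp only
          have hw := pvWeight_unchanged rd c elim hl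
          have hb : pvM rd rest (PySem.Set.add elim c) + 1 = pvM rd (c :: rest) elim := by
            simp [pvM, hw]; omega
          exact IH g1 (by omega) g1' rest _ _ (by omega) (by omega)
        | some cs =>
          dsimp only
          have hw := pvWeight_drop rd c cs elim hl hcne
          have hb : pvM rd (cs ++ rest) (PySem.Set.add elim c) + 2 = pvM rd (c :: rest) elim := by
            simp [pvM]; omega
          exact IH g1 (by omega) g1' (cs ++ rest) _ _ (by omega) (by omega)

-- MAIN LEMMA: one pass of A's child loop = B's stack loop consuming those children
theorem pv_main (rd : List (Int × List Int)) :
    ∀ f cs elim r e, runA rd f cs elim = some (r, e) →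
      ∀ g rest acc, pvM rd (cs ++ rest) elim < g →
        goB rd g (cs ++ rest) elim acc = goB rd g rest e (acc ++ r) := by
  intro f
  induction f using Nat.strong_induction_on with
  | _ f IH =>
    intro cs
    induction cs with
    | nil =>
      intro elim r e hr g rest acc hg
      rw [runA_nil] at hr
      cases hr
      simp
    | cons c cs' ih =>
      intro elim r e hr g rest acc hg
      rw [runA_cons] at hr
      have hlen : ((c :: cs') ++ rest).length = (cs' ++ rest).length + 1 := by simp
      obtain ⟨g1, rfl⟩ : ∃ x, g = x + 1 := ⟨g - 1, by omega⟩
      have hstep : (c :: cs') ++ rest = c :: (cs' ++ rest) := rfl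
      rw [hstep] at hg
      rw [hstep, goB_cons]
      by_cases hc : PySem.Set.contains elim c = true
      · rw [if_pos hc] at hr
        rw [if_pos hc]
        have hM1 : pvM rd (cs' ++ rest) elim + 1 = pvM rd (c :: (cs' ++ rest)) elim := by
          simp only [pvM, List.length_cons, List.length_append]; omega
        rw [ih elim r e hr g1 rest acc (by omega)]
        -- re-raise the fuel from g1 to g1 + 1
        have hgrow := (pv_growA rd f).2 cs' elim r e hr
        have hle : pvM rd rest e ≤ pvM rd rest elim :=
          Nat.add_le_add_left (pvWeight_mono rd elim e hgrow) _
        have hle2 : pvM rd rest elim ≤ pvM rd (cs' ++ rest) elim := by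
          simp only [pvM, List.length_append]; omega
        exact goB_congr rd g1 (g1 + 1) rest e (acc ++ r) (by omega) (by omega)
      · rw [if_neg hc] at hr
        rw [if_neg hc]
        have hcne : c ∉ elim := fun hmem => hc ((PySem.Set.contains_iff _ _).mpr hmem)
        obtain ⟨f1, rfl⟩ : ∃ x, f = x + 1 := by
          cases f with
          | zero => rw [goA_zero] at hr; cases hr
          | succ f1 => exact ⟨f1, rfl⟩
        rw [goA_succ] at hr
        cases hl : pvLookup rd c with
        | none =>
          rw [hl] at hr
          dsimp only at hr
          dsimp only
          cases h2 : runA rd (f1 + 1) cs' (PySem.Set.add elim c) with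
          | none => rw [h2] at hr; cases hr
          | some p2 =>
            obtain ⟨r2, e2⟩ := p2
            rw [h2] at hr
            dsimp only at hr
            rw [Option.some.injEq, Prod.mk.injEq] at hr
            obtain ⟨hre, hee⟩ := hr
            subst hre; subst hee
            have hw := pvWeight_unchanged rd c elim hl
            have hM1 : pvM rd (cs' ++ rest) (PySem.Set.add elim c) + 1
                = pvM rd (c :: (cs' ++ rest)) elim := by
              simp only [pvM, hw, List.length_cons, List.length_append]; omega
            rw [ih _ r2 e2 h2 g1 rest (acc ++ [c]) (by omega)]
            have hgrow := (pv_growA rd (f1 + 1)).2 cs' _ r2 e2 h2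
            have hle : pvM rd rest e2 ≤ pvM rd rest (PySem.Set.add elim c) :=
              Nat.add_le_add_left (pvWeight_mono rd _ e2 hgrow) _
            have hle2 : pvM rd rest (PySem.Set.add elim c) ≤ pvM rd (cs' ++ rest) (PySem.Set.add elim c) := by
              simp only [pvM, List.length_append]; omega
            rw [List.append_assoc]
            exact goB_congr rd g1 (g1 + 1) rest e2 (acc ++ ([c] ++ r2)) (by omega) (by omega)
        | some ds =>
          rw [hl] at hr
          dsimp only at hr
          dsimp only
          cases h1 : runA rd f1 ds (PySem.Set.add elim c) with
          | none => rw [h1] at hr; cases hr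
          | some p1 =>
            obtain ⟨r1, e1⟩ := p1
            rw [h1] at hr
            dsimp only at hr
            cases h2 : runA rd (f1 + 1) cs' e1 with
            | none => rw [h2] at hr; cases hr
            | some p2 =>
              obtain ⟨r2, e2⟩ := p2
              rw [h2] at hr
              dsimp only at hr
              rw [Option.some.injEq, Prod.mk.injEq] at hr
              obtain ⟨hre, hee⟩ := hr
              subst hre; subst hee
              have hw := pvWeight_drop rd c ds elim hl hcne
              have hM2 : pvM rd (ds ++ (cs' ++ rest)) (PySem.Set.add elim c) + 2
                  = pvM rd (c :: (cs' ++ rest)) elim := by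
                simp only [pvM, List.length_cons, List.length_append]; omega
              -- consume ds (A's recursive call, strictly smaller fuel)
              rw [IH f1 (Nat.lt_succ_self f1) ds _ r1 e1 h1 g1 (cs' ++ rest) acc (by omega)]
              -- consume cs' (the remaining loop, same fuel: list induction hypothesis)
              have hgrow1 := (pv_growA rd f1).2 ds _ r1 e1 h1
              have hleM : pvM rd (cs' ++ rest) e1 ≤ pvM rd (cs' ++ rest) (PySem.Set.add elim c) :=
                Nat.add_le_add_left (pvWeight_mono rd _ e1 hgrow1) _
              have hleM2 : pvM rd (cs' ++ rest) (PySem.Set.add elim c)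
                  ≤ pvM rd (ds ++ (cs' ++ rest)) (PySem.Set.add elim c) := by
                simp only [pvM, List.length_append]; omega
              rw [ih e1 r2 e2 h2 g1 rest (acc ++ r1) (by omega)]
              have hgrow2 := (pv_growA rd (f1 + 1)).2 cs' e1 r2 e2 h2
              have hle3 : pvM rd rest e2 ≤ pvM rd rest e1 :=
                Nat.add_le_add_left (pvWeight_mono rd e1 e2 hgrow2) _
              have hle4 : pvM rd rest e1 ≤ pvM rd (cs' ++ rest) e1 := by
                simp only [pvM, List.length_append]; omega
              rw [List.append_assoc]
              exact goB_congr rd g1 (g1 + 1) rest e2 (acc ++ (r1 ++ r2)) (by omega) (by omega)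

-- ===== VERDICT (by name: the statement is the Claim_ definition above) =====
theorem get_children_clusters_spec : Claim_equal_get_children_clusters := by
  unfold Claim_equal_get_children_clusters
  intro rd key el _
  unfold Spec_get_children_clusters get_children_clusters get_children_clusters_alt
  have hsucc : rd.length + 2 = (rd.length + 1) + 1 := rfl
  rw [hsucc, goA_succ]
  cases hl : pvLookup rd key with
  | none => dsimp only
  | some cs =>
    dsimp only
    have hNA : pvNA rd (PySem.Set.add (PySem.Set.ofList el) key) < rd.length + 1 := by
      have h1 : pvNA rd (PySem.Set.add (PySem.Set.ofList el) key)
          ≤ (PySem.List.dedup (rd.map Prod.fst)).length := by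
        unfold pvNA; exact pvWSum_le_length _ _
      have h2 : (PySem.List.dedup (rd.map Prod.fst)).length ≤ (rd.map Prod.fst).length := by
        rw [PySem.List.dedup_eq_ofList]; exact PySem.Set.length_ofList_le _
      rw [List.length_map] at h2
      omega
    obtain ⟨r, e, hr⟩ := runA_suff rd (rd.length + 1) cs (PySem.Set.add (PySem.Set.ofList el) key) hNA
    rw [hr]
    have hM : pvM rd (cs ++ []) (PySem.Set.add (PySem.Set.ofList el) key)
        < cs.length + pvWeight rd (PySem.Set.add (PySem.Set.ofList el) key) + 1 := by
      simp only [pvM, List.append_nil]; omega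
    have hmain := pv_main rd (rd.length + 1) cs (PySem.Set.add (PySem.Set.ofList el) key) r e hr
      (cs.length + pvWeight rd (PySem.Set.add (PySem.Set.ofList el) key) + 1) [] [] hM
    rw [List.append_nil] at hmain
    rw [hmain, goB_nil]
    simp
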